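-- pv_equiv track=rewrite | github.com/youhavetopay/Algorithm | Programmers/고득점kit/완전탐색/1.최소직사각형.py | firstSoul
-- ===== SOURCE A (Python) =====
-- def firstSoul(sizes):
--
--     '''
--         다른 사람 풀이
--         https://velog.io/@guswl8280/%ED%94%84%EB%A1%9C%EA%B7%B8%EB%9E%98%EB%A8%B8%EC%8A%A4-%EC%B5%9C%EC%86%8C-%EC%A7%81%EC%82%AC%EA%B0%81%ED%98%95-Python
--
--         너비와 높이를 비교해서
--         한쪽에 넣어두고 해당 리스트에서 각각 최대값을 뽑아서 품 ㅋㅋ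
--
--         와 역시 코드 깔끔함 ㅋㅋㅋ
--         예전에 내가 풀었던....?? 코드도 이러한 풀이였음
--         보고 했나? ㅋㅋㅋㅋ
--     '''
--
--     w = []
--     h = []
--
--     for i in range(len(sizes)):
--         if sizes[i][0] >= sizes[i][1]:
--             w.append(sizes[i][0])
--             h.append(sizes[i][1])
--         else:
--             h.append(sizes[i][0])
--             w.append(sizes[i][1])
--
--     return max(w) * max(h)
-- ===== SOURCE B (Python) =====
-- def firstSoul(sizes):
--     # Divide and conquer: each half reports its (max width, max height), merge with max.
--     def solve(chunk):
--         if len(chunk) == 1: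
--             s = chunk[0]
--             return max(s[0], s[1]), min(s[0], s[1])
--         mid = len(chunk) // 2
--         lw, lh = solve(chunk[:mid])
--         rw, rh = solve(chunk[mid:])
--         return max(lw, rw), max(lh, rh)
--     w, h = solve(sizes)
--     return w * h
-- ===== Notes on version B (the rewrite author's own statement) =====
-- stated objective: alternative
-- what changed: Divide-and-conquer: recursively split sizes in half, each half returning its (max-width, max-height) pair merged with componentwise max, instead of A's build-two-lists-then-two-max-scans; Pre_ excludes empty input (A raises ValueError, B RecursionError) and rows shorter than 2 (both raise IndexError).
-- outside the precondition, e.g. on firstSoul([]): A raises ValueError, B raises RecursionError; on firstSoul([[5]]): A raises IndexError, B raises IndexError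
import Mathlib
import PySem

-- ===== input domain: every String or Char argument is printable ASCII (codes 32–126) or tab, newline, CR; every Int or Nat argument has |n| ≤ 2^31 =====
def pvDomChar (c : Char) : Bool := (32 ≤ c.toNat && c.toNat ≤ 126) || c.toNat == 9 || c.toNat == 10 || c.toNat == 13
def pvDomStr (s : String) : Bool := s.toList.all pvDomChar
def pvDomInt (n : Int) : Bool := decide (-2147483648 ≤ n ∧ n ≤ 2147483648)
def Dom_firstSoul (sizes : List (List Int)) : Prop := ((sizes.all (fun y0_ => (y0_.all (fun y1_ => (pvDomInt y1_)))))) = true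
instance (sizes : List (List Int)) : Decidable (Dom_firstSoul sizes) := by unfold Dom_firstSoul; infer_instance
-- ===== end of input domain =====

-- B replaces A's build-two-lists-then-two-max-scans with a divide-and-conquer recursion
-- (split in half, merge (max-width, max-height) pairs componentwise); same O(n) cost.

-- ===== PORT A =====
-- loop body of 'for i in range(len(sizes))': state is the pair of lists (w, h)
def firstSoulStep (sizes : List (List Int)) (acc : List Int × List Int) (i : Int) :
    List Int × List Int :=
  let row := PySem.List.pyGetD sizes i []
  let a := PySem.List.pyGetD row 0 0
  let b := PySem.List.pyGetD row 1 0
  if a ≥ b then (acc.1 ++ [a], acc.2 ++ [b]) else (acc.1 ++ [b], acc.2 ++ [a])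

def firstSoul (sizes : List (List Int)) : Int :=
  let wh := (PySem.List.pyRange 0 (sizes.length : Int) 1).foldl (firstSoulStep sizes) ([], [])
  -- max(w), max(h): ValueError on empty is excluded by Pre_ (getD is unreachable there)
  ((PySem.List.max? wh.1 (fun y => y)).getD 0) * ((PySem.List.max? wh.2 (fun y => y)).getD 0)

-- ===== PORT B =====
-- B's 'solve(chunk)': divide and conquer. On [] Python would recurse forever (only
-- reachable outside Pre_); the 'length ≤ 1' guard makes the Lean port total there.
def firstSoulSolve (chunk : List (List Int)) : Int × Int :=
  if _h : chunk.length ≤ 1 then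
    let s := PySem.List.pyGetD chunk 0 []
    (max (PySem.List.pyGetD s 0 0) (PySem.List.pyGetD s 1 0),
     min (PySem.List.pyGetD s 0 0) (PySem.List.pyGetD s 1 0))
  else
    let l := firstSoulSolve (PySem.List.slice chunk none (some (PySem.Int.floordiv (chunk.length : Int) 2)))
    let r := firstSoulSolve (PySem.List.slice chunk (some (PySem.Int.floordiv (chunk.length : Int) 2)) none)
    (max l.1 r.1, max l.2 r.2)
termination_by chunk.length
decreasing_by
  · rw [show PySem.Int.floordiv (chunk.length : Int) 2 = ((chunk.length / 2 : Nat) : Int) from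
        PySem.Int.floordiv_natCast _ 2, PySem.List.slice_to_natCast]
    simp only [List.length_take]
    omega
  · rw [show PySem.Int.floordiv (chunk.length : Int) 2 = ((chunk.length / 2 : Nat) : Int) from
        PySem.Int.floordiv_natCast _ 2, PySem.List.slice_from_natCast]
    simp only [List.length_drop]
    omega

def firstSoul_alt (sizes : List (List Int)) : Int :=
  let wh := firstSoulSolve sizes
  wh.1 * wh.2

-- ===== PRECONDITION & SPEC =====
-- Pre_ excludes inputs where Python A raises: empty sizes (ValueError from max([]))
-- and rows with fewer than 2 entries (IndexError); B raises there too
-- (RecursionError on [], IndexError on short rows).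
def Pre_firstSoul (sizes : List (List Int)) : Prop :=
  sizes ≠ [] ∧ ∀ row ∈ sizes, 2 ≤ row.length
instance (sizes : List (List Int)) : Decidable (Pre_firstSoul sizes) := by
  unfold Pre_firstSoul; infer_instance
def pvWitness_firstSoul : List (List Int) := [[60, 50], [30, 70], [60, 30], [80, 40]]

def Spec_firstSoul (sizes : List (List Int)) (out : Int) : Prop := out = firstSoul_alt sizes
instance (sizes : List (List Int)) (out : Int) : Decidable (Spec_firstSoul sizes out) := by
  unfold Spec_firstSoul; infer_instance

-- ===== CLAIM (what is proved, stated in full; the proofs are below) =====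
def Claim_equal_firstSoul : Prop := ∀ (sizes : List (List Int)), Dom_firstSoul sizes → Pre_firstSoul sizes → Spec_firstSoul sizes (firstSoul sizes)

-- ===== LEMMAS AND PROOFS =====

-- the 'big' and 'small' values a row contributes
def pvBig (r : List Int) : Int := max (PySem.List.pyGetD r 0 0) (PySem.List.pyGetD r 1 0)
def pvSmall (r : List Int) : Int := min (PySem.List.pyGetD r 0 0) (PySem.List.pyGetD r 1 0)

-- running maximum of a projection over a nonempty chunk (seeded with the head's value)
def pvRunMax (f : List Int → Int) (chunk : List (List Int)) : Int :=
  chunk.foldl (fun a r => max a (f r)) (f chunk.headI)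

lemma stepA_eq (sizes : List (List Int)) (acc : List Int × List Int) (i : Int) :
    firstSoulStep sizes acc i =
      (acc.1 ++ [pvBig (PySem.List.pyGetD sizes i [])],
       acc.2 ++ [pvSmall (PySem.List.pyGetD sizes i [])]) := by
  unfold firstSoulStep pvBig pvSmall
  dsimp only
  split_ifs with h
  · simp [max_eq_left h, min_eq_right h]
  · have h' := le_of_not_ge h
    simp [max_eq_right h', min_eq_left h']

lemma foldl_pairs (xs : List (List Int)) (w h : List Int) :
    xs.foldl (fun acc r => (acc.1 ++ [pvBig r], acc.2 ++ [pvSmall r])) (w, h) =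
      (w ++ xs.map pvBig, h ++ xs.map pvSmall) := by
  induction xs generalizing w h with
  | nil => simp
  | cons r t ih => simp [List.foldl_cons, ih]

lemma foldl_max_shift (f : List Int → Int) :
    ∀ (zs : List (List Int)) (a b : Int),
      zs.foldl (fun acc r => max acc (f r)) (max a b) =
        max a (zs.foldl (fun acc r => max acc (f r)) b) := by
  intro zs
  induction zs with
  | nil => intro a b; simp
  | cons z t ih => intro a b; simp only [List.foldl_cons, max_assoc]; exact ih a _

lemma pvRunMax_append (f : List Int → Int) (l r : List (List Int))
    (hl : l ≠ []) (hr : r ≠ []) :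
    pvRunMax f (l ++ r) = max (pvRunMax f l) (pvRunMax f r) := by
  obtain ⟨a, l', rfl⟩ := List.exists_cons_of_ne_nil hl
  obtain ⟨b, r', rfl⟩ := List.exists_cons_of_ne_nil hr
  unfold pvRunMax
  simp only [List.cons_append, List.headI, List.foldl_cons, List.foldl_append, max_self]
  rw [foldl_max_shift f r' _ (f b)]

lemma solve_char : ∀ (n : Nat) (chunk : List (List Int)), chunk.length ≤ n → chunk ≠ [] →
    firstSoulSolve chunk = (pvRunMax pvBig chunk, pvRunMax pvSmall chunk) := by
  intro n
  induction n with
  | zero =>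
    intro chunk hl hne
    cases chunk with
    | nil => exact absurd rfl hne
    | cons x xs => simp at hl
  | succ n ih =>
    intro chunk hl hne
    rw [firstSoulSolve]
    split_ifs with h1
    · -- length ≤ 1 and nonempty: chunk = [s]
      obtain ⟨s, rest, rfl⟩ := List.exists_cons_of_ne_nil hne
      have : rest = [] := by
        cases rest with
        | nil => rfl
        | cons _ _ => simp at h1
      subst this
      simp [pvRunMax, pvBig, pvSmall, List.headI, PySem.List.pyGetD_zero_cons]
    · -- length ≥ 2: split at mid, both halves nonempty and shorter
      have h2 : 2 ≤ chunk.length := by omega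
      rw [show PySem.Int.floordiv (chunk.length : Int) 2 = ((chunk.length / 2 : Nat) : Int) from
            PySem.Int.floordiv_natCast _ 2,
         PySem.List.slice_to_natCast, PySem.List.slice_from_natCast]
      have hmid1 : 1 ≤ chunk.length / 2 := by omega
      have hmid2 : chunk.length / 2 < chunk.length := by omega
      have htne : chunk.take (chunk.length / 2) ≠ [] := by
        intro hc
        have := congrArg List.length hc
        simp only [List.length_take, List.length_nil] at this
        omega
      have hdne : chunk.drop (chunk.length / 2) ≠ [] := by
        intro hc
        have := congrArg List.length hc
        simp only [List.length_drop, List.length_nil] at this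
        omega
      rw [ih _ (by simp only [List.length_take]; omega) htne,
          ih _ (by simp only [List.length_drop]; omega) hdne]
      have hsplit := List.take_append_drop (chunk.length / 2) chunk
      rw [Prod.mk.injEq]
      constructor
      · rw [← pvRunMax_append pvBig _ _ htne hdne, hsplit]
      · rw [← pvRunMax_append pvSmall _ _ htne hdne, hsplit]

-- ===== VERDICT (by name: the statement is the Claim_ definition above) =====
theorem firstSoul_spec : Claim_equal_firstSoul := by
  intro sizes _ hpre
  obtain ⟨hne, _⟩ := hpre
  obtain ⟨r, rest, rfl⟩ := List.exists_cons_of_ne_nil hne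
  unfold Spec_firstSoul firstSoul firstSoul_alt
  have hA : firstSoulStep (r :: rest) = fun acc i =>
      (acc.1 ++ [pvBig (PySem.List.pyGetD (r :: rest) i [])],
       acc.2 ++ [pvSmall (PySem.List.pyGetD (r :: rest) i [])]) := by
    funext acc i; exact stepA_eq (r :: rest) acc i
  rw [hA]
  rw [PySem.List.foldl_pyRange_zero_pyGetD' (r :: rest) []
        (fun acc row => (acc.1 ++ [pvBig row], acc.2 ++ [pvSmall row])) ([], [])]
  rw [foldl_pairs]
  simp only [List.nil_append, List.map_cons]
  rw [PySem.List.max?_id_cons, PySem.List.max?_id_cons]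
  rw [solve_char (r :: rest).length _ le_rfl (by simp)]
  unfold pvRunMax
  simp [List.headI, List.foldl_cons, List.foldl_map, max_self]
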